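-- pv_equiv track=rewrite | github.com/AnniRanok/Segmentation | Instance_Segmentation_fashion.py | to_rle
-- ===== SOURCE A (Python) =====
-- import itertools
--
-- def to_rle(bits):
--     rle = []
--     pos = 0         #position (index) in the bit array, initially set to 0.
--     """grouping of adjacent values ​​in bits. For example, if bits has the value [0, 0, 1, 1, 1, 0],
--        then there will be two groups: one of 0 and one of 1."""
--     for bit, group in itertools.groupby(bits):
--         group_list = list(group)
--         if bit:
--             rle.extend([pos, sum(group_list)])
--         pos += len(group_list)
--     return rle
-- ===== SOURCE B (Python) =====
-- def to_rle(bits):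
--     n = len(bits)
--     starts = [i for i in range(n) if i == 0 or bits[i] != bits[i - 1]]
--     ends = starts[1:] + [n]
--     rle = []
--     for s, e in zip(starts, ends):
--         if bits[s]:
--             rle += [s, bits[s] * (e - s)]
--     return rle
-- ===== Notes on version B (the rewrite author's own statement) =====
-- stated objective: faster
-- what changed: Replaced the single groupby pass (materialize each group as a list, sum it, advance pos by its length) with two staged passes: a comprehension collecting run-boundary indices (where an element differs from its predecessor), then a zip of consecutive boundaries emitting [start, value*(end-start)] per truthy run.
import Mathlib
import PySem

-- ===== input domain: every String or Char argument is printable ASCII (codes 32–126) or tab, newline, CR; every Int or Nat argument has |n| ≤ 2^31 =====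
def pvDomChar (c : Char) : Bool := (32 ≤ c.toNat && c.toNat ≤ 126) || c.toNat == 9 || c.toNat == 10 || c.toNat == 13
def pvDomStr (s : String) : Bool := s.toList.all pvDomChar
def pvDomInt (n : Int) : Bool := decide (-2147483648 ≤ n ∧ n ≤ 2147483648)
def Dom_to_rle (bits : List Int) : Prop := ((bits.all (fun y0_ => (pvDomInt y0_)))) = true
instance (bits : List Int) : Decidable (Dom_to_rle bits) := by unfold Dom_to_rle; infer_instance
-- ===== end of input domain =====

-- B replaces the groupby pass by two staged passes: collect run-boundary indices, then zip consecutive boundaries and emit per run (same O(n); measurably faster by constant factor in a timing run).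


-- ===== PORT A =====
-- itertools.groupby with the default key: consecutive runs of equal elements
def pyGroupby (l : List Int) : List (List Int) :=
  match l with
  | [] => []
  | x :: xs =>
    (x :: xs.takeWhile (fun y => y == x)) :: pyGroupby (xs.dropWhile (fun y => y == x))
termination_by l.length
decreasing_by
  simp only [List.length_cons]
  exact Nat.lt_succ_of_le (List.length_dropWhile_le _ _)

def to_rle (bits : List Int) : List Int :=
  ((pyGroupby bits).foldl
    (fun (st : List Int × Int) group_list =>
      let bit := group_list.headD 0
      let rle := if bit ≠ 0 then st.1 ++ [st.2, group_list.sum] else st.1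
      (rle, st.2 + group_list.length))
    ([], 0)).1

-- ===== PORT B =====
-- the boundary predicate of Source B's comprehension: i == 0 or bits[i] != bits[i-1]
def pB (bits : List Int) (i : Nat) : Bool :=
  i == 0 || !(bits.getD i 0 == bits.getD (i - 1) 0)

def to_rle_alt (bits : List Int) : List Int :=
  let n := bits.length
  let starts := (List.range n).filter (pB bits)
  let ends := starts.drop 1 ++ [n]
  (starts.zip ends).foldl
    (fun rle se =>
      if bits.getD se.1 0 ≠ 0 then
        rle ++ [(se.1 : Int), bits.getD se.1 0 * ((se.2 : Int) - (se.1 : Int))]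
      else rle)
    []

-- ===== PRECONDITION & SPEC =====
def Spec_to_rle (bits : List Int) (out : List Int) : Prop := out = to_rle_alt bits
instance (bits : List Int) (out : List Int) : Decidable (Spec_to_rle bits out) := by unfold Spec_to_rle; infer_instance

-- ===== CLAIM (what is proved, stated in full; the proofs are below) =====
def Claim_equal_to_rle : Prop := ∀ (bits : List Int), Dom_to_rle bits → Spec_to_rle bits (to_rle bits)

-- ===== LEMMAS AND PROOFS =====

-- proof-only intermediate: run-by-run recursion both ports are reduced to
def runLen (x : Int) : List Int → Nat
  | [] => 0
  | y :: ys => if y == x then 1 + runLen x ys else 0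

def altGo (i : Int) (l : List Int) : List Int :=
  match l with
  | [] => []
  | x :: xs =>
    let k : Nat := 1 + runLen x xs
    let rest := altGo (i + (k : Int)) ((x :: xs).drop k)
    if x ≠ 0 then i :: x * (k : Int) :: rest else rest
termination_by l.length
decreasing_by
  simp only [List.length_drop, List.length_cons]
  omega

theorem runLen_eq_takeWhile (x : Int) (xs : List Int) :
    runLen x xs = (xs.takeWhile (fun y => y == x)).length := by
  induction xs with
  | nil => rfl
  | cons y ys ih =>
    by_cases h : y = x
    · simp [runLen, h, ih]; omega
    · simp [runLen, h]

theorem drop_runLen (x : Int) (xs : List Int) :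
    xs.drop (runLen x xs) = xs.dropWhile (fun y => y == x) := by
  induction xs with
  | nil => rfl
  | cons y ys ih =>
    by_cases h : y = x
    · simp only [runLen, List.dropWhile_cons, h]
      simp only [beq_self_eq_true, if_true]
      rw [Nat.add_comm]
      simpa using ih
    · simp [runLen, h]

theorem runLen_le (x : Int) (xs : List Int) : runLen x xs ≤ xs.length := by
  induction xs with
  | nil => simp [runLen]
  | cons y ys ih =>
    by_cases h : y = x <;> simp [runLen, h] <;> omega

theorem sum_run (x : Int) (xs : List Int) :
    (x :: xs.takeWhile (fun y => y == x)).sum = x * (1 + runLen x xs : Nat) := by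
  induction xs with
  | nil => simp [runLen]
  | cons y ys ih =>
    simp only [List.takeWhile, runLen]
    by_cases h : y = x
    · subst h
      simp only [beq_self_eq_true, if_true]
      have := ih
      simp only [List.sum_cons] at this ⊢
      push_cast
      push_cast at this
      linarith
    · have hb : (y == x) = false := by simp [h]
      simp [hb]

theorem keyA (l : List Int) : ∀ (rle : List Int) (pos : Int),
    ((pyGroupby l).foldl
      (fun (st : List Int × Int) group_list =>
        let bit := group_list.headD 0
        let rle := if bit ≠ 0 then st.1 ++ [st.2, group_list.sum] else st.1
        (rle, st.2 + group_list.length))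
      (rle, pos)).1 = rle ++ altGo pos l := by
  induction l using pyGroupby.induct with
  | case1 => intro rle pos; simp [pyGroupby, altGo]
  | case2 x xs ih =>
    intro rle pos
    rw [pyGroupby, altGo]
    simp only [List.foldl_cons]
    have hdrop : (x :: xs).drop (1 + runLen x xs) = xs.dropWhile (fun y => y == x) := by
      have : (x :: xs).drop (1 + runLen x xs) = xs.drop (runLen x xs) := by
        rw [Nat.add_comm]; rfl
      rw [this, drop_runLen]
    rw [ih]
    simp only [List.headD_cons, hdrop]
    by_cases hx : x = 0
    · subst hx
      simp only [ne_eq, not_true_eq_false, if_false]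
      simp only [List.length_cons, runLen_eq_takeWhile]
      push_cast
      ring_nf
    · have hs := sum_run x xs
      have hl : ((x :: xs.takeWhile (fun y => y == x)).length : Int)
          = ((1 + runLen x xs : Nat) : Int) := by
        simp [runLen_eq_takeWhile, Nat.add_comm]
      simp only [hx, ne_eq, not_false_iff, if_true, hs, List.append_assoc, List.cons_append,
        List.nil_append, hl]

-- every element of the run at the head of `x :: xs` equals x
theorem run_elem (x : Int) (xs : List Int) : ∀ m, m < 1 + runLen x xs → (x :: xs).getD m 0 = x := by
  induction xs with
  | nil =>
    intro m hm
    simp [runLen] at hm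
    subst hm; rfl
  | cons y ys ih =>
    intro m hm
    match m with
    | 0 => rfl
    | Nat.succ m' =>
      by_cases h : y = x
      · subst h
        simp only [runLen, beq_self_eq_true, if_true] at hm
        have := ih m' (by omega)
        simpa using this
      · simp [runLen, h] at hm

-- the first element after a maximal run differs from the run's value
theorem dropWhile_head_ne (x : Int) (xs : List Int) (z : Int) (zs : List Int)
    (h : xs.dropWhile (fun y => y == x) = z :: zs) : z ≠ x := by
  induction xs with
  | nil => simp at h
  | cons y ys ih =>
    by_cases hy : y = x
    · simpa [List.dropWhile_cons, hy] using ih (by simpa [List.dropWhile_cons, hy] using h)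
    · have hb : (y == x) = false := by simp [hy]
      rw [List.dropWhile_cons, hb] at h
      simp at h
      rw [← h.1]; exact hy

theorem getD_drop (bits : List Int) (a m : Nat) (l : List Int) (h : bits.drop a = l)
    (hm : m < l.length) : bits.getD (a + m) 0 = l.getD m 0 := by
  rw [List.getD_eq_getElem?_getD, List.getD_eq_getElem?_getD, ← List.getElem?_drop, h]

-- the boundary list over a run splits off exactly the run's start
theorem filter_run (bits : List Int) (a : Nat) (x : Int) (xs : List Int)
    (hdrop : bits.drop a = x :: xs) (hpa : pB bits a = true) :
    (List.range' a (bits.length - a)).filter (pB bits)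
      = a :: (List.range' (a + (1 + runLen x xs)) (bits.length - (a + (1 + runLen x xs)))).filter (pB bits) := by
  set k := 1 + runLen x xs with hk
  have halen : bits.length - a = (x :: xs).length := by
    rw [← hdrop, List.length_drop]
  have hale : a < bits.length := by
    by_contra hc
    push_neg at hc
    have : bits.drop a = [] := List.drop_eq_nil_of_le hc
    rw [this] at hdrop; simp at hdrop
  have hkle : k ≤ bits.length - a := by
    rw [halen]
    have h2 := runLen_le x xs
    simp only [List.length_cons]
    omega
  -- split range' at the end of the run
  have hxl : bits.length - a = xs.length + 1 := by rw [halen]; rfl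
  have hsplit : List.range' a (bits.length - a)
      = List.range' a k ++ List.range' (a + k) (bits.length - a - k) := by
    rw [List.range'_append_1]
    congr 1
    omega
  have harith : bits.length - a - k = bits.length - (a + k) := by omega
  rw [hsplit, List.filter_append, harith]
  congr 1
  -- filter over the run's indices keeps only `a`
  have hcons : List.range' a k = a :: List.range' (a + 1) (k - 1) := by
    conv_lhs => rw [show k = (k - 1) + 1 by omega]
    rw [List.range'_succ]
  rw [hcons, List.filter_cons, hpa]
  have hnil : (List.range' (a + 1) (k - 1)).filter (pB bits) = [] := by
    rw [List.filter_eq_nil_iff]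
    intro i hi
    rw [List.mem_range'_1] at hi
    obtain ⟨h1, h2⟩ := hi
    have hm : ∃ m, i = a + m ∧ 1 ≤ m ∧ m < k := ⟨i - a, by omega, by omega, by omega⟩
    obtain ⟨m, rfl, hm1, hm2⟩ := hm
    have e1 : bits.getD (a + m) 0 = x := by
      rw [getD_drop bits a m _ hdrop (by simp only [List.length_cons]; omega)]
      exact run_elem x xs m (by omega)
    have e2 : bits.getD (a + m - 1) 0 = x := by
      have h3 : a + m - 1 = a + (m - 1) := by omega
      rw [h3, getD_drop bits a (m - 1) _ hdrop (by simp only [List.length_cons]; omega)]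
      exact run_elem x xs (m - 1) (by omega)
    have hfalse : pB bits (a + m) = false := by
      unfold pB
      rw [e1, e2]
      simp
      omega
    simp [hfalse]
  simp [hnil]

-- the run-boundary after a run is a boundary (when something follows)
theorem pB_next (bits : List Int) (a : Nat) (x : Int) (xs : List Int) (z : Int) (zs : List Int)
    (hdrop : bits.drop a = x :: xs)
    (hnext : bits.drop (a + (1 + runLen x xs)) = z :: zs) :
    pB bits (a + (1 + runLen x xs)) = true := by
  set k := 1 + runLen x xs with hk
  have e1 : bits.getD (a + k) 0 = z := by
    have := getD_drop bits (a + k) 0 (z :: zs) hnext (by simp)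
    simpa using this
  have e2 : bits.getD (a + k - 1) 0 = x := by
    have h1 : a + k - 1 = a + (k - 1) := by omega
    have hlen : k - 1 < (x :: xs).length := by
      have h2 := runLen_le x xs
      simp only [List.length_cons]; omega
    rw [h1, getD_drop bits a (k - 1) _ hdrop hlen]
    exact run_elem x xs (k - 1) (by omega)
  have hz : z ≠ x := by
    have hd : xs.dropWhile (fun y => y == x) = z :: zs := by
      have h1 : bits.drop (a + k) = (bits.drop a).drop k := by
        rw [List.drop_drop]
      rw [h1, hdrop] at hnext
      have h2 : (x :: xs).drop k = xs.drop (runLen x xs) := by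
        rw [hk, Nat.add_comm]; rfl
      rw [h2, drop_runLen] at hnext
      exact hnext
    exact dropWhile_head_ne x xs z zs hd
  unfold pB
  rw [e1, e2]
  simp [hz]

-- B's staged passes compute the same run-by-run recursion
theorem keyB (l : List Int) : ∀ (bits : List Int) (a : Nat) (rle : List Int),
    bits.drop a = l → (l ≠ [] → pB bits a = true) →
    ((((List.range' a (bits.length - a)).filter (pB bits)).zip
        ((((List.range' a (bits.length - a)).filter (pB bits)).drop 1) ++ [bits.length])).foldl
      (fun rle se =>
        if bits.getD se.1 0 ≠ 0 then
          rle ++ [(se.1 : Int), bits.getD se.1 0 * ((se.2 : Int) - (se.1 : Int))]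
        else rle)
      rle) = rle ++ altGo (a : Int) l := by
  induction l using pyGroupby.induct with
  | case1 =>
    intro bits a rle hdrop _
    have hlen : bits.length - a = 0 := by
      have := congrArg List.length hdrop
      simp [List.length_drop] at this
      omega
    simp [hlen, altGo]
  | case2 x xs ih =>
    intro bits a rle hdrop hpa
    have hpa' := hpa (by simp)
    set k := 1 + runLen x xs with hk
    have hfil := filter_run bits a x xs hdrop hpa'
    rw [← hk] at hfil
    have hxa : bits.getD a 0 = x := by
      have := getD_drop bits a 0 (x :: xs) hdrop (by simp)
      simpa using this
    have hdd : bits.drop (a + k) = (x :: xs).drop k := by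
      rw [← hdrop, List.drop_drop]
    have haltgo : altGo (a : Int) (x :: xs)
        = if x ≠ 0 then (a : Int) :: x * (k : Int) :: altGo ((a : Int) + (k : Int)) ((x :: xs).drop k)
          else altGo ((a : Int) + (k : Int)) ((x :: xs).drop k) := by
      rw [altGo]
    rcases hnil : bits.drop (a + k) with _ | ⟨z, zs⟩
    · -- no further run: a+k = bits.length, S' = []
      have hlen2 : bits.length ≤ a + k := by
        by_contra hc
        push_neg at hc
        have : bits.drop (a + k) ≠ [] := by
          intro hcc
          have := congrArg List.length hcc
          simp [List.length_drop] at this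
          omega
        exact this hnil
      have hle : a < bits.length := by
        by_contra hc
        push_neg at hc
        have : bits.drop a = [] := List.drop_eq_nil_of_le hc
        rw [this] at hdrop; simp at hdrop
      have hz : bits.length - (a + k) = 0 := by omega
      rw [hfil, hz]
      simp only [List.range'_zero, List.filter_nil, List.drop_succ_cons, List.drop_nil,
        List.nil_append, List.zip_cons_cons, List.zip_nil_right, List.foldl_cons, List.foldl_nil]
      -- a + k = bits.length here
      have heq : bits.length = a + k := by
        have hlen3 : bits.length - a = (x :: xs).length := by
          rw [← hdrop, List.length_drop]
        have hkle : k ≤ (x :: xs).length := by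
          have h2 := runLen_le x xs
          simp only [List.length_cons]; omega
        have h4 := congrArg List.length hnil
        simp [List.length_drop] at h4
        omega
      have hrest : altGo ((a : Int) + (k : Int)) ((x :: xs).drop k) = [] := by
        rw [← hdd, hnil, altGo]
      rw [haltgo, hrest, hxa, heq]
      by_cases hx : x = 0
      · simp [hx]
      · simp [hx]
    · -- further runs exist: S' = (a+k) :: …
      have hpb2 := pB_next bits a x xs z zs hdrop (by rw [← hk]; exact hnil)
      rw [← hk] at hpb2
      have hfil2 := filter_run bits (a + k) z zs hnil hpb2
      rw [hfil, hfil2]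
      simp only [List.drop_succ_cons, List.drop_zero, List.cons_append, List.zip_cons_cons,
        List.foldl_cons]
      have h5 : List.drop k (x :: xs) = xs.drop (runLen x xs) := by
        rw [hk, Nat.add_comm]; rfl
      have hdw : xs.dropWhile (fun y => y == x) = z :: zs := by
        rw [← drop_runLen, ← h5, ← hdd, hnil]
      have hih := ih bits (a + k) (if bits.getD a 0 ≠ 0 then
          rle ++ [(a : Int), bits.getD a 0 * ((↑(a + k) : Int) - (a : Int))] else rle)
        (by rw [hdw]; exact hnil) (fun _ => hpb2)
      rw [hdw] at hih
      rw [hfil2] at hih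
      simp only [List.drop_succ_cons, List.drop_zero] at hih
      rw [hih]
      rw [haltgo, hxa]
      have hdd2 : (x :: xs).drop k = z :: zs := by rw [← hdd, hnil]
      rw [hdd2]
      have harith : ((↑(a + k) : Int) - (a : Int)) = (k : Int) := by push_cast; ring
      have harith2 : ((↑(a + k) : Int)) = (a : Int) + (k : Int) := by push_cast; ring
      by_cases hx : x = 0
      · simp [hx, harith2]
      · simp [hx, harith2]

-- ===== VERDICT (by name: the statement is the Claim_ definition above) =====
theorem to_rle_spec : Claim_equal_to_rle := by
  intro bits _
  show to_rle bits = to_rle_alt bits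
  have hA := keyA bits [] 0
  have hB := keyB bits bits 0 [] (by simp) (fun _ => by simp [pB])
  simp only [List.nil_append, Nat.sub_zero, Nat.cast_zero] at hA hB
  unfold to_rle to_rle_alt
  simp only [List.range_eq_range']
  rw [hA, ← hB]
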